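-- pv_equiv track=rewrite | github.com/mpaulaherrero/tesis-frameworks-backend-diagrams | _reverseEngineCode/getPackagesLevel.py | getLevelPackageName
-- ===== SOURCE A (Python) =====
-- def isFilter(package, FILTER):
--     filters = FILTER.split("|")
--     for filter in filters:
--         if filter in package:
--             return True
--     return False
--
-- def getLevelPackageName(packageLargeName, LEVEL, LEVEL_BASE):
--     package = packageLargeName.split(".")
--     packageName = package[0]
--     if len(package) > LEVEL:
--         for i in range(1, LEVEL+1):
--             packageName += "." + package[i]
--     if not isFilter(packageName, LEVEL_BASE):
--         packageName = getLevelPackageName(packageName, LEVEL-1, "")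
--     return packageName
-- ===== SOURCE B (Python) =====
-- def isFilter(package, FILTER):
--     return any(f in package for f in FILTER.split("|"))
--
-- def _trunc(name, L):
--     parts = name.split(".")
--     if len(parts) <= L:
--         return parts[0]
--     end = L + 1 if L >= 0 else 1
--     return parts[0] + "".join("." + p for p in parts[1:end])
--
-- def getLevelPackageName(packageLargeName, LEVEL, LEVEL_BASE):
--     t1 = _trunc(packageLargeName, LEVEL)
--     if isFilter(t1, LEVEL_BASE):
--         return t1
--     return _trunc(t1, LEVEL - 1)
-- ===== Notes on version B (the rewrite author's own statement) =====
-- stated objective: simpler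
-- what changed: A's self-recursion (which always terminates after exactly one extra step, because the recursive call passes FILTER="" and isFilter(x, "") is always True) is replaced by flat code: a single truncation helper using split/slice/join, applied once and, if the filter does not match, once more with LEVEL-1.
import Mathlib
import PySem

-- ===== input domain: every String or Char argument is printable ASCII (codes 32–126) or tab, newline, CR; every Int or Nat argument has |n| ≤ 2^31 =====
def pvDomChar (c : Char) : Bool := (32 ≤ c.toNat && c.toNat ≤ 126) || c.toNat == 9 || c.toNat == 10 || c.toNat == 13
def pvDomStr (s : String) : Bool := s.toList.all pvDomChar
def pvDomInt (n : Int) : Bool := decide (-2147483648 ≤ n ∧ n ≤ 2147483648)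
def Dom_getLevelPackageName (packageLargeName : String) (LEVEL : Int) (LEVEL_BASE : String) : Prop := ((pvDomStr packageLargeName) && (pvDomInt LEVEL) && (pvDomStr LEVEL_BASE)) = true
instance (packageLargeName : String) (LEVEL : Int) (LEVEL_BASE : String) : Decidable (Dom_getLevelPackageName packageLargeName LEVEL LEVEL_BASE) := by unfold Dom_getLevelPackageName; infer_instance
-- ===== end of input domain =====

-- B replaces A's LEVEL-1 self-recursion (whose second call always stops, because the
-- recursive call passes FILTER="" and isFilter(x, "") is always True) by flat code:
-- one truncation helper applied at most twice.  Objective: simpler (no recursion).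

-- ===== PORT A =====
-- shared helper: Python's isFilter (identical in Source A and Source B); the for-loop with
-- early 'return True' is ported as List.any
def isFilterPort (package FILTER : List Char) : Bool :=
  (PySem.Chars.splitOn FILTER ['|']).any (fun f => PySem.Chars.isIn f package)

-- the port of A needs this fact for termination: isFilter(x, "") is always True
theorem isFilterPort_nil (pn : List Char) : isFilterPort pn [] = true := by
  simp [isFilterPort, show PySem.Chars.splitOn [] ['|'] = [[]] from rfl, PySem.Chars.isIn_nil]

-- A's body on List Char (strings are handled code-point-exactly at the Chars level;
-- package[0] is .headD [] and package[i] is pyGetD — both always in range here, since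
-- split never returns [] and the loop runs only when LEVEL < len(package))
def goA (name : List Char) (L : Int) (B : List Char) : List Char :=
  let package := PySem.Chars.splitOn name ['.']
  let packageName :=
    if ((package.length : Int)) > L then
      (PySem.List.pyRange 1 (L + 1)).foldl
        (fun acc i => acc ++ '.' :: PySem.List.pyGetD package i []) (package.headD [])
    else package.headD []
  if h : isFilterPort packageName B = true then packageName
  else goA packageName (L - 1) []
termination_by (if B = [] then 0 else 1 : Nat)
decreasing_by
  by_cases hB : B = []
  · exact absurd (hB ▸ isFilterPort_nil packageName) h
  · simp [hB]

def getLevelPackageName (packageLargeName : String) (LEVEL : Int) (LEVEL_BASE : String) : String :=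
  String.ofList (goA packageLargeName.toList LEVEL LEVEL_BASE.toList)

-- ===== PORT B =====
-- Source B's _trunc on List Char: parts[0] when len(parts) <= L, else
-- parts[0] + "".join("." + p for p in parts[1:end]) with end = L+1 if L >= 0 else 1
def truncB (name : List Char) (L : Int) : List Char :=
  let parts := PySem.Chars.splitOn name ['.']
  if ((parts.length : Int)) ≤ L then parts.headD []
  else
    parts.headD [] ++
      PySem.Chars.join []
        ((PySem.List.slice parts (some 1) (some (if 0 ≤ L then L + 1 else 1))).map
          (fun p => '.' :: p))

def getLevelPackageName_alt (packageLargeName : String) (LEVEL : Int) (LEVEL_BASE : String) : String :=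
  let t1 := truncB packageLargeName.toList LEVEL
  if isFilterPort t1 LEVEL_BASE.toList then String.ofList t1
  else String.ofList (truncB t1 (LEVEL - 1))

-- ===== PRECONDITION & SPEC =====
def Spec_getLevelPackageName (packageLargeName : String) (LEVEL : Int) (LEVEL_BASE : String) (out : String) : Prop := out = getLevelPackageName_alt packageLargeName LEVEL LEVEL_BASE
instance (packageLargeName : String) (LEVEL : Int) (LEVEL_BASE : String) (out : String) : Decidable (Spec_getLevelPackageName packageLargeName LEVEL LEVEL_BASE out) := by unfold Spec_getLevelPackageName; infer_instance

-- ===== CLAIM (what is proved, stated in full; the proofs are below) =====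
def Claim_equal_getLevelPackageName : Prop := ∀ (packageLargeName : String) (LEVEL : Int) (LEVEL_BASE : String), Dom_getLevelPackageName packageLargeName LEVEL LEVEL_BASE → Spec_getLevelPackageName packageLargeName LEVEL LEVEL_BASE (getLevelPackageName packageLargeName LEVEL LEVEL_BASE)

-- ===== LEMMAS AND PROOFS =====

-- "".join(xss) is concatenation
theorem join_nil_sep (xss : List (List Char)) : PySem.Chars.join [] xss = xss.flatten := by
  induction xss with
  | nil => simp [PySem.Chars.join_nil]
  | cons h t ih => cases t with
    | nil => simp [PySem.Chars.join_singleton]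
    | cons h2 t2 => simp [PySem.Chars.join_cons_cons, ih]

-- the indices 1..k of A's loop read exactly the slice parts[1:k+1] of B
theorem map_pyRange_eq_take {α : Type} (parts : List α) (d : α) (k : Nat)
    (hk : k + 1 ≤ parts.length) :
    (PySem.List.pyRange 1 ((k : Int) + 1)).map (fun i => PySem.List.pyGetD parts i d)
      = (parts.drop 1).take k := by
  induction k with
  | zero => rfl
  | succ n ih =>
    have h1 : (1 : Int) ≤ (n : Int) + 1 := by omega
    have hrec := PySem.List.pyRange_one_succ_right (a := 1) (b := (n : Int) + 1) h1
    have hc : ((n : Int) + 1 + 1) = (((n + 1 : Nat) : Int) + 1) := by push_cast; ring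
    have hn1 : n + 1 < parts.length := by omega
    rw [← hc, hrec, List.map_append, ih (by omega)]
    have hget : PySem.List.pyGetD parts ((n : Int) + 1) d = parts[n + 1] := by
      have := PySem.List.pyGetD_ofNat parts (n + 1) d hn1
      rw [← this]; norm_cast
    simp only [List.map_cons, List.map_nil, hget]
    rw [List.take_add_one]
    congr 1
    have hlen : n < (parts.drop 1).length := by simp; omega
    rw [List.getElem?_eq_getElem hlen]
    have : (parts.drop 1)[n] = parts[n + 1] := by
      rw [List.getElem_drop]
      simp only [Nat.add_comm 1 n]
    rw [this]
    rfl

-- A's inline truncation (head + loop over range(1, LEVEL+1)) computes B's _trunc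
theorem fold_eq_trunc (name : List Char) (L : Int) :
    (let package := PySem.Chars.splitOn name ['.']
     if ((package.length : Int)) > L then
       (PySem.List.pyRange 1 (L + 1)).foldl
         (fun acc i => acc ++ '.' :: PySem.List.pyGetD package i []) (package.headD [])
     else package.headD []) = truncB name L := by
  simp only [truncB]
  generalize PySem.Chars.splitOn name ['.'] = parts
  by_cases hgt : ((parts.length : Int)) > L
  · rw [if_pos hgt, if_neg (by omega)]
    by_cases hL : 0 ≤ L
    · rw [if_pos hL]
      have hfold : ∀ (init : List Char),
          (PySem.List.pyRange 1 (L + 1)).foldl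
            (fun acc i => acc ++ '.' :: PySem.List.pyGetD parts i []) init
          = init ++ (PySem.List.pyRange 1 (L + 1)).flatMap
              (fun i => '.' :: PySem.List.pyGetD parts i []) := by
        intro init
        exact PySem.List.foldl_append_eq_flatMap _ _ init
      rw [hfold, join_nil_sep]
      congr 1
      rw [PySem.List.slice_toNat parts (by omega) (by omega)]
      have h2 : (L + 1).toNat - Int.toNat 1 = L.toNat := by omega
      rw [show Int.toNat 1 = 1 from rfl] at h2 ⊢
      rw [h2, ← map_pyRange_eq_take parts ([] : List Char) L.toNat (by omega),
        List.map_map, show ((L.toNat : Nat) : Int) = L from by omega, List.flatMap_def]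
      rfl
    · rw [if_neg hL]
      have h1 : PySem.List.pyRange 1 (L + 1) = [] := by
        exact PySem.List.pyRange_one_eq_nil (by omega)
      rw [h1, PySem.List.slice_toNat parts (by omega) (by omega)]
      simp [PySem.Chars.join_nil]
  · rw [if_neg hgt, if_pos (by omega)]

-- A with the empty filter returns the truncation unchanged (its recursion always stops)
theorem goA_nil (name : List Char) (L : Int) : goA name L [] = truncB name L := by
  rw [goA]
  simp only [isFilterPort_nil, dite_true]
  exact fold_eq_trunc name L

-- one unfolding of A's recursion = B's flat two-step computation
theorem goA_eq (name : List Char) (L : Int) (B : List Char) :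
    goA name L B = (if isFilterPort (truncB name L) B then truncB name L
                    else truncB (truncB name L) (L - 1)) := by
  rw [goA]
  have ht := fold_eq_trunc name L
  simp only [] at ht ⊢
  rw [ht]
  by_cases h : isFilterPort (truncB name L) B = true
  · rw [dif_pos h, if_pos h]
  · rw [dif_neg h, if_neg h, goA_nil]

-- ===== VERDICT (by name: the statement is the Claim_ definition above) =====
theorem getLevelPackageName_spec : Claim_equal_getLevelPackageName := by
  intro n L B _
  unfold Spec_getLevelPackageName getLevelPackageName getLevelPackageName_alt
  rw [goA_eq]
  by_cases h : isFilterPort (truncB n.toList L) B.toList = true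
  · rw [if_pos h, if_pos h]
  · rw [if_neg h, if_neg h]
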